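-- pv_equiv track=rewrite | github.com/wilmurillo-ai/Design-Assistant | .skills/openclaw-skills/skills/ibuler/jumpserver/scripts/jumpserver_api/jms_analytics.py | _server_filters
-- ===== SOURCE A (Python) =====
-- from typing import Any
--
-- def _server_filters(filters: dict[str, Any]) -> dict[str, Any]:
--     payload = {}
--     for key in (
--         "date_from",
--         "date_to",
--         "limit",
--         "offset",
--         "search",
--         "keyword",
--         "status",
--         "type",
--         "user_id",
--         "asset_id",
--         "command_storage_id",
--         "order",
--         "is_finished",
--         "users",
--         "resource_type",
--         "category",
--         "days",
--         "id",
--         "node",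
--         "node_id",
--         "asset",
--         "display",
--         "draw",
--         "all",
--     ):
--         if filters.get(key) not in {None, ""}:
--             payload[key] = filters[key]
--     return payload
-- ===== SOURCE B (Python) =====
-- # B: bucket table -- one pass over filters.items() drops each kept value into a
-- # fixed-position slot, then the non-empty slots are emitted in canonical order.
-- _ORDER = (
--     "date_from", "date_to", "limit", "offset", "search", "keyword", "status",
--     "type", "user_id", "asset_id", "command_storage_id", "order", "is_finished",
--     "users", "resource_type", "category", "days", "id", "node", "node_id",
--     "asset", "display", "draw", "all",
-- )
-- _MISSING = object()
--
-- def _server_filters(filters):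
--     slots = [_MISSING] * len(_ORDER)
--     for k, v in filters.items():
--         if k in _ORDER and v not in (None, ""):
--             slots[_ORDER.index(k)] = v
--     return {k: v for k, v in zip(_ORDER, slots) if v is not _MISSING}
-- ===== Notes on version B (the rewrite author's own statement) =====
-- stated objective: alternative
-- what changed: B replaces A's 24 per-key dict.get() probes accumulating into a payload dict by a bucket table: one pass over filters.items() places each kept value into a fixed slot array indexed by the key's canonical position, and the non-empty slots are then emitted in order via zip.
import Mathlib
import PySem

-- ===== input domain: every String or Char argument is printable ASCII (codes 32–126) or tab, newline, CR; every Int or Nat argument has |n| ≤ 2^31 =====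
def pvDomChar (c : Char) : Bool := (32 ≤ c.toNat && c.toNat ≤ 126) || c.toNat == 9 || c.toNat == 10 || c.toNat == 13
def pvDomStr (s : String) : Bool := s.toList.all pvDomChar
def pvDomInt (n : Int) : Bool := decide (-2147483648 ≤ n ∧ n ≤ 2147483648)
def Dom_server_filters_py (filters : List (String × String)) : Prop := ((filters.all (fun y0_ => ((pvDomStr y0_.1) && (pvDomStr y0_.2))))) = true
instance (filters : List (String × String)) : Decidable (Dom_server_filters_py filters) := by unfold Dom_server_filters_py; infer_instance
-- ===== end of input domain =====

-- B replaces A's per-allowed-key probing by a bucket table: one pass over the input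
-- items places each kept value into a fixed slot, emitted in canonical order (alternative algorithm).

-- ===== PORT A =====
-- the fixed tuple of allowed keys (the same literal tuple appears in both sources)
def pvAllowedKeys : List String :=
  ["date_from", "date_to", "limit", "offset", "search", "keyword", "status",
   "type", "user_id", "asset_id", "command_storage_id", "order", "is_finished",
   "users", "resource_type", "category", "days", "id", "node", "node_id",
   "asset", "display", "draw", "all"]

-- loop body: `if filters.get(key) not in {None, ""}: payload[key] = filters[key]`
-- (filters.get(key) = some v with v ≠ "" — the guarded filters[key] is exactly that v)
def server_filters_py (filters : List (String × String)) : List (String × String) :=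
  (pvAllowedKeys.foldl (fun payload key =>
      match (PySem.Dict.mk filters).get? key with
      | some v => if v ≠ "" then payload.insert key v else payload
      | none => payload)
    (PySem.Dict.empty : PySem.Dict String String)).items

-- ===== PORT B =====
-- loop body: `if k in _ORDER and v not in (None, ""): slots[_ORDER.index(k)] = v`
-- (_ORDER.index is PySem.List.index?; the guard makes it `some`, so the none arm is unreachable)
def pvStepB (slots : List (Option String)) (kv : String × String) : List (Option String) :=
  if kv.1 ∈ pvAllowedKeys ∧ kv.2 ≠ "" then
    match PySem.List.index? pvAllowedKeys kv.1 with
    | some j => PySem.List.pySetD slots (j : Int) (some kv.2)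
    | none => slots
  else slots

-- `slots = [_MISSING] * len(_ORDER)`; missing = none.  The final dict comprehension over
-- zip(_ORDER, slots) inserts pairs with distinct keys in order, i.e. this filterMap list.
def server_filters_py_alt (filters : List (String × String)) : List (String × String) :=
  let slots := filters.foldl pvStepB (List.replicate pvAllowedKeys.length (none : Option String))
  (pvAllowedKeys.zip slots).filterMap (fun p => p.2.map (fun v => (p.1, v)))

-- ===== PRECONDITION & SPEC =====
-- Pre_ excludes association lists with duplicate keys: they do not arise from a Python
-- dict, and which pair represents the key is an accident of the encoding.
def Pre_server_filters_py (filters : List (String × String)) : Prop :=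
  (filters.map Prod.fst).Nodup
instance (filters : List (String × String)) : Decidable (Pre_server_filters_py filters) := by
  unfold Pre_server_filters_py; infer_instance

def pvWitness_server_filters_py : (List (String × String)) :=
  [("limit", "5"), ("search", ""), ("foo", "x"), ("all", "1")]

def Spec_server_filters_py (filters : List (String × String)) (out : List (String × String)) : Prop := out = server_filters_py_alt filters
instance (filters : List (String × String)) (out : List (String × String)) : Decidable (Spec_server_filters_py filters out) := by unfold Spec_server_filters_py; infer_instance

-- ===== CLAIM (what is proved, stated in full; the proofs are below) =====
def Claim_equal_server_filters_py : Prop := ∀ (filters : List (String × String)), Dom_server_filters_py filters → Pre_server_filters_py filters → Spec_server_filters_py filters (server_filters_py filters)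

-- ===== LEMMAS AND PROOFS =====

-- the value A's branch keeps for a key (none = branch not taken)
def pvKept (filters : List (String × String)) (k : String) : Option String :=
  match (PySem.Dict.mk filters).get? k with
  | some v => if v ≠ "" then some v else none
  | none => none

-- A's loop over any nodup key list, from a payload not containing those keys, appends
theorem pv_foldl_items (filters : List (String × String)) (ks : List String)
    (payload : PySem.Dict String String)
    (hks : ks.Nodup)
    (hfresh : ∀ k ∈ ks, payload.contains k = false) :
    (ks.foldl (fun payload key =>
        match (PySem.Dict.mk filters).get? key with
        | some v => if v ≠ "" then payload.insert key v else payload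
        | none => payload) payload).items =
      payload.items ++ ks.filterMap (fun k => (pvKept filters k).map (fun v => (k, v))) := by
  induction ks generalizing payload with
  | nil => simp
  | cons k ks ih =>
      obtain ⟨hk, hks'⟩ := by simpa [List.nodup_cons] using hks
      have hkfresh : payload.contains k = false := hfresh k (by simp)
      have htail : ∀ k' ∈ ks, payload.contains k' = false :=
        fun k' h => hfresh k' (by simp [h])
      cases hg : (PySem.Dict.mk filters).get? k with
      | none =>
          simp only [List.foldl_cons, hg]
          rw [ih payload hks' htail]
          simp [pvKept, hg]
      | some v =>
          by_cases hv : v ≠ ""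
          · simp only [List.foldl_cons, hg, if_pos hv]
            rw [ih (payload.insert k v) hks' ?_]
            · rw [PySem.Dict.items_insert_of_not_contains payload v hkfresh]
              simp [pvKept, hg, hv]
            · intro k' hk'
              have hne : k' ≠ k := fun h => hk (h ▸ hk')
              rw [PySem.Dict.contains_insert]
              simp [hne, htail k' hk']
          · simp only [List.foldl_cons, hg, if_neg hv]
            rw [ih payload hks' htail]
            simp at hv
            simp [pvKept, hg, hv]

-- one B-step preserves the slot-array length
theorem pvStepB_length (slots : List (Option String)) (kv : String × String) :
    (pvStepB slots kv).length = slots.length := by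
  unfold pvStepB
  split_ifs with h
  · cases hidx : PySem.List.index? pvAllowedKeys kv.1 with
    | none => rfl
    | some j => simp
  · rfl

theorem pv_foldl_length (l : List (String × String)) (slots0 : List (Option String)) :
    (l.foldl pvStepB slots0).length = slots0.length := by
  induction l generalizing slots0 with
  | nil => rfl
  | cons kv rest ih => rw [List.foldl_cons, ih, pvStepB_length]

-- invariant of B's pass: slot j holds exactly the value A's branch keeps for key j
theorem pv_slots (l : List (String × String)) (slots0 : List (Option String))
    (hnd : (l.map Prod.fst).Nodup) (hlen : slots0.length = pvAllowedKeys.length)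
    (j : Nat) (hj : j < pvAllowedKeys.length) :
    (l.foldl pvStepB slots0)[j]? =
      match pvKept l pvAllowedKeys[j] with
      | some v => some (some v)
      | none => slots0[j]? := by
  induction l generalizing slots0 with
  | nil => simp [pvKept, PySem.Dict.get?]
  | cons kv rest ih =>
      obtain ⟨ak, av⟩ := kv
      obtain ⟨ha, hrest⟩ : (∀ x, (ak, x) ∉ rest) ∧ (rest.map Prod.fst).Nodup := by
        simpa [List.nodup_cons] using hnd
      have hknone : (PySem.Dict.mk rest).get? ak = none := by
        rw [PySem.Dict.get?_eq_none_iff_not_mem_keys]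
        intro hmem
        have h1 : ak ∈ rest.map Prod.fst := by
          simpa [PySem.Dict.keys, PySem.Dict.items] using hmem
        obtain ⟨⟨q1, q2⟩, hq, hq1⟩ := List.mem_map.mp h1
        dsimp at hq1
        subst hq1
        exact ha q2 hq
      have hkcons : pvKept ((ak, av) :: rest) pvAllowedKeys[j] =
          if ak = pvAllowedKeys[j] then (if av ≠ "" then some av else none)
          else pvKept rest pvAllowedKeys[j] := by
        by_cases hc : ak = pvAllowedKeys[j]
        · simp [pvKept, PySem.Dict.get?_mk_cons, hc]
        · simp [pvKept, PySem.Dict.get?_mk_cons, hc]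
      rw [List.foldl_cons]
      by_cases hc : ak = pvAllowedKeys[j]
      · -- this item's key is key j
        have hmem : ak ∈ pvAllowedKeys := hc ▸ pvAllowedKeys.getElem_mem hj
        have hkrest : pvKept rest pvAllowedKeys[j] = none := by
          simp [pvKept, ← hc, hknone]
        by_cases hav : av ≠ ""
        · -- the pair is kept: the step writes slot j
          obtain ⟨j0, hidx⟩ := Option.isSome_iff_exists.mp
            ((PySem.List.index?_isSome_iff pvAllowedKeys ak).mpr hmem)
          obtain ⟨hj0, hval, -⟩ := PySem.List.getElem_of_index?_eq_some hidx
          have hj0j : j0 = j := by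
            have : pvAllowedKeys[j0] = pvAllowedKeys[j] := by rw [hval, hc]
            exact (List.Nodup.getElem_inj_iff (by decide : pvAllowedKeys.Nodup)).mp this
          have hstep : pvStepB slots0 (ak, av) = slots0.set j (some av) := by
            unfold pvStepB
            rw [if_pos ⟨hmem, hav⟩, hidx]
            simp [hj0j]
          rw [hstep, ih (slots0.set j (some av)) hrest (by simpa using hlen),
              hkcons, if_pos hc, if_pos hav, hkrest]
          rw [List.getElem?_set_self (by omega)]
        · -- empty value: the step is the identity and nothing is kept
          have hstep : pvStepB slots0 (ak, av) = slots0 := by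
            unfold pvStepB
            rw [if_neg (by tauto)]
          rw [hstep, ih slots0 hrest hlen, hkcons, if_pos hc,
              if_neg hav, hkrest]
      · -- a different key: slot j is untouched by the step
        have hstep : (pvStepB slots0 (ak, av))[j]? = slots0[j]? := by
          unfold pvStepB
          split_ifs with h
          · cases hidx : PySem.List.index? pvAllowedKeys ak with
            | none => rfl
            | some j0 =>
                obtain ⟨hj0, hval, -⟩ := PySem.List.getElem_of_index?_eq_some hidx
                have hne : j0 ≠ j := fun he => hc (by simpa [he] using hval.symm)
                simp [List.getElem?_set_ne hne]
          · rfl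
        rw [ih (pvStepB slots0 (ak, av)) hrest (by rw [pvStepB_length, hlen]),
            hkcons, if_neg hc, hstep]

-- the final slot array IS the canonical map of kept values
theorem pv_slots_final (filters : List (String × String))
    (hnd : (filters.map Prod.fst).Nodup) :
    filters.foldl pvStepB (List.replicate pvAllowedKeys.length (none : Option String)) =
      pvAllowedKeys.map (pvKept filters) := by
  apply List.ext_getElem?
  intro j
  by_cases hj : j < pvAllowedKeys.length
  · rw [pv_slots filters _ hnd (by simp) j hj, List.getElem?_map,
        List.getElem?_eq_getElem hj]
    cases hk : pvKept filters pvAllowedKeys[j] with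
    | none => simp [hk, hj]
    | some v => simp [hk]
  · rw [List.getElem?_eq_none (by simpa [pv_foldl_length] using le_of_not_gt hj),
        List.getElem?_eq_none (by simpa using le_of_not_gt hj)]

-- ===== VERDICT (by name: the statement is the Claim_ definition above) =====
theorem server_filters_py_spec : Claim_equal_server_filters_py := by
  intro filters _ hpre
  unfold Spec_server_filters_py server_filters_py server_filters_py_alt
  rw [pv_foldl_items filters pvAllowedKeys PySem.Dict.empty (by decide)
        (fun k _ => by simp [PySem.Dict.contains_empty])]
  rw [show (PySem.Dict.empty : PySem.Dict String String).items = [] from rfl, List.nil_append]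
  rw [pv_slots_final filters hpre]
  show _ = (pvAllowedKeys.zip (pvAllowedKeys.map (pvKept filters))).filterMap
      (fun p => p.2.map (fun v => (p.1, v)))
  rw [← List.map_prod_left_eq_zip]
  rw [List.filterMap_map]
  rfl
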